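-- pv_equiv track=rewrite | github.com/guaguakai/TSG | util.py | generateAllTeams
-- ===== SOURCE A (Python) =====
-- import itertools
--
-- def generateAllTeams(R, mR):
--     teams = []
--     i =0
--     for nR in range(mR):
--         iterator = itertools.combinations(range(R), nR+1)
--         for x in iterator:
--             i+=1
--             teams.append(x)
--     teams.append([])
--     #teams.append([])
--     return teams
-- ===== SOURCE B (Python) =====
-- def generateAllTeams(R, mR):
--     teams = []
--     level = [()]
--     for _ in range(mR):
--         nxt = []
--         for t in level:
--             start = t[-1] + 1 if t else 0
--             for j in range(start, R):
--                 nxt.append(t + (j,))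
--         level = nxt
--         teams.extend(level)
--     teams.append([])
--     return teams
-- ===== Notes on version B (the rewrite author's own statement) =====
-- stated objective: alternative
-- what changed: replaces the per-size itertools.combinations calls with an incremental level-by-level construction: each size's combinations are built by extending the previous level's tuples with every strictly larger index
import Mathlib
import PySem

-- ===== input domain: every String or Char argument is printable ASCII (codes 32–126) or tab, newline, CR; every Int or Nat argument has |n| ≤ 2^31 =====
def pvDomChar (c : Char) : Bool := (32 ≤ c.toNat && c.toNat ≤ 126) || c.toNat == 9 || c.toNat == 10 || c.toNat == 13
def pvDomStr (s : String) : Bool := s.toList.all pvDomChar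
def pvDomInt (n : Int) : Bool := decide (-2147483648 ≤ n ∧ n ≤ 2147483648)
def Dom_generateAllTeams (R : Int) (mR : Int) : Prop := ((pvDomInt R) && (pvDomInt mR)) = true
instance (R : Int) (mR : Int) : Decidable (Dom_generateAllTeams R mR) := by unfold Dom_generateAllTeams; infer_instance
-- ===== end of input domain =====

-- B replaces the per-size itertools.combinations calls by an incremental level-by-level construction
-- (each level extends the previous level's tuples with every strictly larger index); alternative, not claimed faster.

-- ===== PORT A =====
-- itertools.combinations(xs, k) in lexicographic order (standard-library call, ported as the standard recursion)
def pvCombos (xs : List Int) : Nat → List (List Int)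
  | 0 => [[]]
  | k + 1 =>
    match xs with
    | [] => []
    | x :: rest => (pvCombos rest k).map (fun u => x :: u) ++ pvCombos rest (k + 1)

def generateAllTeams (R : Int) (mR : Int) : List (List Int) :=
  ((PySem.List.pyRange 0 mR 1).foldl
      (fun teams nR => teams ++ pvCombos (PySem.List.pyRange 0 R 1) (nR + 1).toNat) [])
    ++ [[]]

-- ===== PORT B =====
-- extend one tuple t with every j in range(t[-1]+1 if t else 0, R)
def pvExtend (R : Int) (t : List Int) : List (List Int) :=
  (PySem.List.pyRange (match t.getLast? with | none => 0 | some x => x + 1) R 1).map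
    (fun j => t ++ [j])

def pvNextLevel (R : Int) (level : List (List Int)) : List (List Int) :=
  level.flatMap (pvExtend R)

def pvAltLoop (R : Int) : Nat → List (List Int) → List (List Int)
  | 0, _ => []
  | n + 1, level =>
      let nxt := pvNextLevel R level
      nxt ++ pvAltLoop R n nxt

def generateAllTeams_alt (R : Int) (mR : Int) : List (List Int) :=
  pvAltLoop R mR.toNat [[]] ++ [[]]

-- ===== PRECONDITION & SPEC =====
def Spec_generateAllTeams (R : Int) (mR : Int) (out : List (List Int)) : Prop := out = generateAllTeams_alt R mR
instance (R : Int) (mR : Int) (out : List (List Int)) : Decidable (Spec_generateAllTeams R mR out) := by unfold Spec_generateAllTeams; infer_instance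

-- ===== CLAIM =====
def Claim_equal_generateAllTeams : Prop := ∀ (R : Int) (mR : Int), Dom_generateAllTeams R mR → Spec_generateAllTeams R mR (generateAllTeams R mR)

-- ===== LEMMAS AND PROOFS =====

-- pvExtend with a general fallback start s (used only for the empty tuple)
def pvExtendS (R s : Int) (t : List Int) : List (List Int) :=
  (PySem.List.pyRange (match t.getLast? with | none => s | some x => x + 1) R 1).map
    (fun j => t ++ [j])

lemma pvExtend_eq (R : Int) (t : List Int) : pvExtend R t = pvExtendS R 0 t := rfl

lemma pvExtendS_cons (R s : Int) (u : List Int) :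
    pvExtendS R s (s :: u) = (pvExtendS R (s + 1) u).map (fun v => s :: v) := by
  cases hg : u.getLast? with
  | none =>
      rw [List.getLast?_eq_none_iff] at hg
      subst hg
      simp [pvExtendS, List.map_map, Function.comp]
  | some x =>
      have hne : u ≠ [] := by
        intro h; subst h; simp at hg
      have hg' : (s :: u).getLast? = some x := by
        cases u with
        | nil => simp at hg
        | cons a l => rw [List.getLast?_cons_cons]; exact hg
      simp [pvExtendS, hg, hg', List.map_map, Function.comp]

lemma pvExtendS_of_ne_nil (R s s' : Int) (u : List Int) (h : u ≠ []) :
    pvExtendS R s u = pvExtendS R s' u := by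
  cases hg : u.getLast? with
  | none => rw [List.getLast?_eq_none_iff] at hg; exact absurd hg h
  | some x => simp [pvExtendS, hg]

lemma pvCombos_one (xs : List Int) : pvCombos xs 1 = xs.map (fun x => [x]) := by
  induction xs with
  | nil => rfl
  | cons x rest ih => simp [pvCombos, ih]

lemma pvCombos_ne_nil (xs : List Int) (k : Nat) (u : List Int)
    (hu : u ∈ pvCombos xs (k + 1)) : u ≠ [] := by
  induction xs generalizing k with
  | nil => simp [pvCombos] at hu
  | cons x rest ih =>
      simp only [pvCombos, List.mem_append, List.mem_map] at hu
      rcases hu with ⟨v, _, rfl⟩ | h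
      · simp
      · exact ih k h

lemma pvCombos_key (R : Int) :
    ∀ (n : Nat) (s : Int) (k : Nat), (R - s).toNat ≤ n →
      (pvCombos (PySem.List.pyRange s R 1) k).flatMap (pvExtendS R s)
        = pvCombos (PySem.List.pyRange s R 1) (k + 1) := by
  intro n
  induction n with
  | zero =>
      intro s k h
      have hRs : R ≤ s := by omega
      rw [PySem.List.pyRange_one_eq_nil hRs]
      cases k with
      | zero => simp [pvCombos, pvExtendS, PySem.List.pyRange_one_eq_nil hRs]
      | succ k => simp [pvCombos]
  | succ n ih =>
      intro s k h
      by_cases hRs : R ≤ s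
      · rw [PySem.List.pyRange_one_eq_nil hRs]
        cases k with
        | zero => simp [pvCombos, pvExtendS, PySem.List.pyRange_one_eq_nil hRs]
        | succ k => simp [pvCombos]
      · have hsR : s < R := by omega
        rw [PySem.List.pyRange_one_cons hsR]
        cases k with
        | zero =>
            simp only [pvCombos, List.flatMap_cons, List.flatMap_nil, List.append_nil]
            rw [pvCombos_one]
            simp only [pvExtendS, List.getLast?_nil, List.nil_append]
            rw [PySem.List.pyRange_one_cons hsR]
            simp
        | succ k =>
            have hn : (R - (s + 1)).toNat ≤ n := by omega
            simp only [pvCombos, List.flatMap_append, List.flatMap_map]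
            have h1 : ((pvCombos (PySem.List.pyRange (s+1) R 1) k).flatMap
                (fun u => pvExtendS R s (s :: u)))
                = ((pvCombos (PySem.List.pyRange (s+1) R 1) k).flatMap
                    (pvExtendS R (s+1))).map (fun v => s :: v) := by
              rw [List.map_flatMap]
              exact List.flatMap_congr (fun u _ => pvExtendS_cons R s u)
            have h2 : (pvCombos (PySem.List.pyRange (s+1) R 1) (k+1)).flatMap (pvExtendS R s)
                = (pvCombos (PySem.List.pyRange (s+1) R 1) (k+1)).flatMap (pvExtendS R (s+1)) :=
              List.flatMap_congr (fun u hu =>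
                pvExtendS_of_ne_nil R s (s+1) u (pvCombos_ne_nil _ k u hu))
            rw [h1, h2, ih (s+1) k hn, ih (s+1) (k+1) hn]

lemma pvNextLevel_combos (R : Int) (k : Nat) :
    pvNextLevel R (pvCombos (PySem.List.pyRange 0 R 1) k)
      = pvCombos (PySem.List.pyRange 0 R 1) (k + 1) := by
  have := pvCombos_key R (R - 0).toNat 0 k (le_refl _)
  simpa [pvNextLevel, pvExtend_eq] using this

-- the concatenation of levels k+1, k+2, …, k+m of combinations of range(R)
def pvSpine (R : Int) : Nat → Nat → List (List Int)
  | _, 0 => []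
  | k, m + 1 => pvCombos (PySem.List.pyRange 0 R 1) (k + 1) ++ pvSpine R (k + 1) m

lemma pvAltLoop_spine (R : Int) :
    ∀ (m k : Nat), pvAltLoop R m (pvCombos (PySem.List.pyRange 0 R 1) k) = pvSpine R k m := by
  intro m
  induction m with
  | zero => intro k; rfl
  | succ m ih =>
      intro k
      simp only [pvAltLoop, pvSpine, pvNextLevel_combos R k, ih (k + 1)]

lemma pvFold_spine (R : Int) :
    ∀ (n : Nat) (a b : Int), 0 ≤ a → (b - a).toNat = n →
      (PySem.List.pyRange a b 1).flatMap
          (fun nR => pvCombos (PySem.List.pyRange 0 R 1) (nR + 1).toNat)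
        = pvSpine R a.toNat n := by
  intro n
  induction n with
  | zero =>
      intro a b _ h
      rw [show PySem.List.pyRange a b 1 = [] from PySem.List.pyRange_one_eq_nil (by omega)]
      simp [pvSpine]
  | succ n ih =>
      intro a b ha h
      have hab : a < b := by omega
      have ha1 : (0 : Int) ≤ a + 1 := by omega
      have hb1 : (b - (a + 1)).toNat = n := by omega
      rw [PySem.List.pyRange_one_cons hab, List.flatMap_cons, ih (a + 1) b ha1 hb1]
      have h1 : (a + 1).toNat = a.toNat + 1 := by omega
      rw [h1]
      simp [pvSpine]

-- ===== VERDICT =====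
theorem generateAllTeams_spec : Claim_equal_generateAllTeams := by
  intro R mR _
  show generateAllTeams R mR = generateAllTeams_alt R mR
  unfold generateAllTeams generateAllTeams_alt
  rw [PySem.List.foldl_append_eq_flatMap, List.nil_append,
    pvFold_spine R mR.toNat 0 mR (le_refl 0) (by omega)]
  have h0 : ([[]] : List (List Int)) = pvCombos (PySem.List.pyRange 0 R 1) 0 := by
    simp [pvCombos]
  rw [h0, pvAltLoop_spine R mR.toNat 0]
  norm_num
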